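-- pv_equiv track=rewrite | github.com/calumpwebb/Spotty | app/permutations.py | generate_sentence_permutations
-- ===== SOURCE A (Python) =====
-- def generate_sentence_permutations(sentence, max_word_count):
--     words = sentence.split()
--     total_number_of_words = len(words)
--     result = []
--
--     stack = [(0, [])]
--
--     while stack:
--         start, current_group = stack.pop()
--
--         # If we've reached the end of the sentence, add the current grouping to the result
--         if start == total_number_of_words:
--             result.append(current_group)
--             continue
--
--         # Iterate over all possible lengths of the next group, but limit to max_concat_words
--         for end in range(
--             start + 1, min(start + max_word_count + 1, total_number_of_words + 1)
--         ):
--             # Create the next group by joining words from start to end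
--             next_group = " ".join(words[start:end])
--             # Push the new state into the stack
--             stack.append((end, current_group + [next_group]))
--
--     return result
-- ===== SOURCE B (Python) =====
-- def generate_sentence_permutations(sentence, max_word_count):
--     words = sentence.split()
--     n = len(words)
--     result = []
--
--     def rec(start, current):
--         if start == n:
--             result.append(current)
--             return
--         # descending end positions, matching the LIFO largest-first order
--         for end in range(min(start + max_word_count, n), start, -1):
--             rec(end, current + [" ".join(words[start:end])])
--
--     rec(0, [])
--     return result
-- ===== Notes on version B (the rewrite author's own statement) =====
-- stated objective: simpler
-- what changed: Replaces A's explicit LIFO stack machine (tuples pushed/popped with an ascending inner range) by a recursive backtracking helper over the word index with a descending end loop, splitting the sentence once and accumulating results directly.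
import Mathlib
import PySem

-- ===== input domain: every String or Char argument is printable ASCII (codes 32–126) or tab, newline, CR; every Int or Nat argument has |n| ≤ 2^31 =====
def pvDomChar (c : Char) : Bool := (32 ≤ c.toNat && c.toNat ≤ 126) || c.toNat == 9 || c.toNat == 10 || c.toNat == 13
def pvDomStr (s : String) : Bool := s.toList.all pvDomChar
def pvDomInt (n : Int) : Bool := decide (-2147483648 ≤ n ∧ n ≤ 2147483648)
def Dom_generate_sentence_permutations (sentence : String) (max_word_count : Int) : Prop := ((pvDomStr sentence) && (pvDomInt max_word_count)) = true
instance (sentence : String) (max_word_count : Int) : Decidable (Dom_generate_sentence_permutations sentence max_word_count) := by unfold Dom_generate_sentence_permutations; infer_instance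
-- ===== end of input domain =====

-- B replaces A's explicit LIFO stack machine by a recursive backtracking helper (simpler); return values are equal.

-- ===== PORT A =====
-- measure used only for termination of the stack loop
def pvMeasA (words : List String) (m : Int) (st : List (Int × List String)) : Nat :=
  (st.map (fun p => (m.toNat + 2) ^ ((((words.length : Int)) + 1 - p.1).toNat))).sum

theorem pvMeasA_dec (words : List String) (m : Int) (start : Int) (g : List String)
    (rest : List (Int × List String)) (hne : start ≠ (words.length : Int)) :
    pvMeasA words m
      (((PySem.List.pyRange (start + 1) (min (start + m + 1) ((words.length : Int) + 1)) 1).map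
          (fun e => (e, g ++ [PySem.Str.join " " (PySem.List.slice words (some start) (some e))]))).reverse ++ rest)
      < pvMeasA words m ((start, g) :: rest) := by
  classical
  set N : Int := (words.length : Int) with hN
  set B0 : Nat := m.toNat + 2 with hB0
  have hB0pos : 0 < B0 := by omega
  unfold pvMeasA
  rw [List.map_append, List.sum_append, List.map_cons, List.sum_cons]
  rw [List.map_reverse, List.sum_reverse, List.map_map]
  -- it suffices that the pushed sum is < B0 ^ (N+1-start).toNat
  have key : ((PySem.List.pyRange (start + 1) (min (start + m + 1) (N + 1)) 1).map
      (fun e => B0 ^ ((N + 1 - e).toNat))).sum < B0 ^ ((N + 1 - start).toNat) := by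
    by_cases hlt : start < N
    · set u : Int := min (start + m + 1) (N + 1) with hu
      have hbound : ∀ x ∈ (PySem.List.pyRange (start + 1) u 1).map
          (fun e => B0 ^ ((N + 1 - e).toNat)), x ≤ B0 ^ ((N - start).toNat) := by
        intro x hx
        rcases List.mem_map.mp hx with ⟨e, he, rfl⟩
        have hmem := (PySem.List.mem_pyRange_one).mp he
        exact Nat.pow_le_pow_right (by omega) (by omega)
      have hsum := List.sum_le_card_nsmul _ _ hbound
      rw [List.length_map, PySem.List.length_pyRange_one, smul_eq_mul] at hsum
      have hlen : (u - (start + 1)).toNat ≤ m.toNat := by omega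
      have hpow : (N + 1 - start).toNat = (N - start).toNat + 1 := by omega
      calc ((PySem.List.pyRange (start + 1) u 1).map (fun e => B0 ^ ((N + 1 - e).toNat))).sum
          ≤ (u - (start + 1)).toNat * B0 ^ ((N - start).toNat) := hsum
        _ ≤ m.toNat * B0 ^ ((N - start).toNat) := Nat.mul_le_mul_right _ hlen
        _ < B0 * B0 ^ ((N - start).toNat) :=
            mul_lt_mul_of_pos_right (by omega) (pow_pos hB0pos _)
        _ = B0 ^ ((N + 1 - start).toNat) := by rw [hpow, pow_succ]; ring
    · have hgt : N < start := by omega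
      rw [PySem.List.pyRange_one_eq_nil (by omega)]
      simpa using pow_pos hB0pos ((N + 1 - start).toNat)
  exact Nat.add_lt_add_right key _

def pvLoopA (words : List String) (m : Int) :
    List (Int × List String) → List (List String) → List (List String)
  | [], result => result
  | (start, g) :: rest, result =>
    if h : start = (words.length : Int) then
      pvLoopA words m rest (result ++ [g])
    else
      pvLoopA words m
        (((PySem.List.pyRange (start + 1) (min (start + m + 1) ((words.length : Int) + 1)) 1).map
            (fun e => (e, g ++ [PySem.Str.join " " (PySem.List.slice words (some start) (some e))]))).reverse ++ rest)
        result
  termination_by st _ => pvMeasA words m st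
  decreasing_by
  · unfold pvMeasA
    simp only [List.map_cons, List.sum_cons]
    have : 0 < (m.toNat + 2) ^ (((words.length : Int)) + 1 - start).toNat := pow_pos (by omega) _
    omega
  · exact pvMeasA_dec words m start g rest h

def generate_sentence_permutations (sentence : String) (max_word_count : Int) : List (List String) :=
  pvLoopA (PySem.Str.split₀ sentence) max_word_count [(0, [])] []

-- ===== PORT B =====
def pvRecB (words : List String) (m : Int) (start : Int) (current : List String) : List (List String) :=
  if start = (words.length : Int) then [current]
  else
    ((PySem.List.pyRange (min (start + m) ((words.length : Int))) start (-1)).attach.map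
      (fun e => pvRecB words m e.1
        (current ++ [PySem.Str.join " " (PySem.List.slice words (some start) (some e.1))]))).flatten
  termination_by ((words.length : Int) - start).toNat
  decreasing_by
    have := (PySem.List.mem_pyRange_neg_one).mp e.2
    omega

def generate_sentence_permutations_alt (sentence : String) (max_word_count : Int) : List (List String) :=
  pvRecB (PySem.Str.split₀ sentence) max_word_count 0 []

-- ===== PRECONDITION & SPEC =====
def Spec_generate_sentence_permutations (sentence : String) (max_word_count : Int) (out : List (List String)) : Prop := out = generate_sentence_permutations_alt sentence max_word_count
instance (sentence : String) (max_word_count : Int) (out : List (List String)) : Decidable (Spec_generate_sentence_permutations sentence max_word_count out) := by unfold Spec_generate_sentence_permutations; infer_instance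

-- ===== CLAIM (what is proved, stated in full; the proofs are below) =====
def Claim_equal_generate_sentence_permutations : Prop := ∀ (sentence : String) (max_word_count : Int), Dom_generate_sentence_permutations sentence max_word_count → Spec_generate_sentence_permutations sentence max_word_count (generate_sentence_permutations sentence max_word_count)

-- ===== LEMMAS AND PROOFS =====
theorem pvLoopA_eq (words : List String) (m : Int) (st : List (Int × List String))
    (res : List (List String)) :
    pvLoopA words m st res = res ++ (st.map (fun p => pvRecB words m p.1 p.2)).flatten := by
  induction st, res using pvLoopA.induct words m with
  | case1 res => simp [pvLoopA]
  | case2 g rest res ih =>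
      rw [pvLoopA, dif_pos rfl, ih]
      simp only [List.map_cons, List.flatten_cons]
      rw [pvRecB, if_pos rfl]
      simp
  | case3 start g rest res h ih =>
      rw [pvLoopA, dif_neg h, ih]
      simp only [List.map_cons, List.flatten_cons]
      rw [pvRecB, if_neg h]
      congr 1
      rw [List.map_append, List.flatten_append, List.map_reverse, List.map_map]
      have hmin : min (start + m) ((words.length : Int)) =
          min (start + m + 1) ((words.length : Int) + 1) - 1 := by omega
      rw [hmin, PySem.List.pyRange_neg_one_eq_reverse]
      congr 2
      rw [sub_add_cancel]
      simp [List.map_attach_eq_pmap, Function.comp]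

-- ===== VERDICT (by name: the statement is the Claim_ definition above) =====
theorem generate_sentence_permutations_spec : Claim_equal_generate_sentence_permutations := by
  intro sentence m _
  unfold Spec_generate_sentence_permutations generate_sentence_permutations generate_sentence_permutations_alt
  rw [pvLoopA_eq]
  simp
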